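-- pv_equiv track=rewrite | github.com/AYUSHSHARMA9817/SolSentry | build/lib/solsentry/detectors/reentrancy.py | detect_state_after_call
-- ===== SOURCE A (Python) =====
-- def detect_state_after_call(ops):
--
--     seen_external = False
--
--     for _, op, _ in ops:
--
--         if op == "external_call":
--             seen_external = True
--
--         if op == "state_write" and seen_external:
--             return True
--
--     return False
-- ===== SOURCE B (Python) =====
-- def detect_state_after_call(ops):
--     tags = [op for _, op, _ in ops]
--     calls = [i for i, op in enumerate(tags) if op == "external_call"]
--     writes = [i for i, op in enumerate(tags) if op == "state_write"]
--     return bool(calls) and bool(writes) and min(calls) < max(writes)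
-- ===== Notes on version B (the rewrite author's own statement) =====
-- stated objective: alternative
-- what changed: Replaces A's flag-carrying scan with an index-arithmetic formulation: collect the indices of all external_call and state_write ops and return whether the earliest call index precedes the latest write index.
import Mathlib
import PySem

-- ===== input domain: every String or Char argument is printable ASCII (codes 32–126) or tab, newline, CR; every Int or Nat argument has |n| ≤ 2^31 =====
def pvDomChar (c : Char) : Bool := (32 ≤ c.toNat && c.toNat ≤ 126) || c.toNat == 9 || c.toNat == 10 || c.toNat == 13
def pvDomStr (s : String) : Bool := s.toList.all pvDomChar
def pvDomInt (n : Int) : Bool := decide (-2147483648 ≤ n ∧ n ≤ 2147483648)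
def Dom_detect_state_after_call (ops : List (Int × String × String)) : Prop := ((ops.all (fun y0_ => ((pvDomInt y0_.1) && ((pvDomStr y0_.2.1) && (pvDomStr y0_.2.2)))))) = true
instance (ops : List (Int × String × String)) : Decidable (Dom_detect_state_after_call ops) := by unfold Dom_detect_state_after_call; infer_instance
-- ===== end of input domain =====

-- B replaces A's flag-carrying scan with index arithmetic: collect the indices of the
-- external_call and state_write ops and compare min(calls) with max(writes); alternative
-- decomposition, same O(n) cost.

-- ===== PORT A =====
-- literal transliteration of A's for-loop with the seen_external flag
def detect_state_after_call_loop (seen : Bool) : List (Int × String × String) → Bool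
  | [] => false
  | (_, op, _) :: t =>
    let seen := if op == "external_call" then true else seen
    if op == "state_write" && seen then true
    else detect_state_after_call_loop seen t

def detect_state_after_call (ops : List (Int × String × String)) : Bool :=
  detect_state_after_call_loop false ops

-- ===== PORT B =====
-- tags = [op for _,op,_ in ops]; calls/writes = index comprehensions over enumerate(tags);
-- result = bool(calls) and bool(writes) and min(calls) < max(writes)
def detect_state_after_call_alt (ops : List (Int × String × String)) : Bool :=
  let tags := ops.map (fun x => x.2.1)
  let calls := (PySem.List.enumerate tags).filterMap
      (fun p => if p.2 == "external_call" then some p.1 else none)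
  let writes := (PySem.List.enumerate tags).filterMap
      (fun p => if p.2 == "state_write" then some p.1 else none)
  if calls.isEmpty || writes.isEmpty then false
  else
    match PySem.List.min? calls (fun x => x), PySem.List.max? writes (fun x => x) with
    | some a, some b => decide (a < b)
    | _, _ => false

-- ===== PRECONDITION & SPEC =====
def Spec_detect_state_after_call (ops : List (Int × String × String)) (out : Bool) : Prop := out = detect_state_after_call_alt ops
instance (ops : List (Int × String × String)) (out : Bool) : Decidable (Spec_detect_state_after_call ops out) := by unfold Spec_detect_state_after_call; infer_instance

-- ===== CLAIM (what is proved, stated in full; the proofs are below) =====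
def Claim_equal_detect_state_after_call : Prop := ∀ (ops : List (Int × String × String)), Dom_detect_state_after_call ops → Spec_detect_state_after_call ops (detect_state_after_call ops)

-- ===== LEMMAS AND PROOFS =====

-- both programs decide this proposition: some external_call strictly precedes some state_write
def HasCallBeforeWrite (tags : List String) : Prop :=
  ∃ i j : Nat, i < j ∧ tags[i]? = some "external_call" ∧ tags[j]? = some "state_write"

-- once A's flag is true, the loop is exactly "any state_write in the rest"
theorem loop_true_eq_any (l : List (Int × String × String)) :
    detect_state_after_call_loop true l = l.any (fun item => item.2.1 == "state_write") := by
  induction l with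
  | nil => simp [detect_state_after_call_loop]
  | cons h t ih =>
    obtain ⟨i, op, s⟩ := h
    by_cases hop : op = "state_write"
    · simp [detect_state_after_call_loop, hop]
    · simp [detect_state_after_call_loop, hop, ih]

theorem any_iff_exists_getElem? (tags : List String) :
    tags.any (fun op => op == "state_write") = true ↔ ∃ j : Nat, tags[j]? = some "state_write" := by
  constructor
  · intro h
    obtain ⟨x, hx, hfx⟩ := List.any_eq_true.1 h
    have hxe : x = "state_write" := by simpa using hfx
    obtain ⟨j, hj⟩ := List.mem_iff_getElem?.1 hx
    exact ⟨j, hxe ▸ hj⟩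
  · rintro ⟨j, hj⟩
    exact List.any_eq_true.2 ⟨_, List.mem_iff_getElem?.2 ⟨j, hj⟩, by simp⟩

-- A decides HasCallBeforeWrite
theorem A_iff (ops : List (Int × String × String)) :
    detect_state_after_call ops = true ↔ HasCallBeforeWrite (ops.map (fun x => x.2.1)) := by
  induction ops with
  | nil => simp [detect_state_after_call, detect_state_after_call_loop, HasCallBeforeWrite]
  | cons h t ih =>
    obtain ⟨v, op, w⟩ := h
    by_cases hec : op = "external_call"
    · have hne : op ≠ "state_write" := by rw [hec]; decide
      constructor
      · intro hA
        have : (t.map (fun x => x.2.1)).any (fun op => op == "state_write") = true := by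
          simpa [detect_state_after_call, detect_state_after_call_loop, hec, hne,
            loop_true_eq_any, List.any_map, Function.comp] using hA
        obtain ⟨j, hj⟩ := (any_iff_exists_getElem? _).1 this
        exact ⟨0, j + 1, by omega, by simp [hec], by simpa using hj⟩
      · rintro ⟨i, j, hij, hi, hj⟩
        have hjpos : j ≠ 0 := by
          intro h0; rw [h0] at hj; simp [hec] at hj
        obtain ⟨j', rfl⟩ := Nat.exists_eq_succ_of_ne_zero hjpos
        have : (t.map (fun x => x.2.1)).any (fun op => op == "state_write") = true :=
          (any_iff_exists_getElem? _).2 ⟨j', by simpa using hj⟩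
        simpa [detect_state_after_call, detect_state_after_call_loop, hec, hne,
          loop_true_eq_any, List.any_map, Function.comp] using this
    · have hstep : detect_state_after_call ((v, op, w) :: t) = detect_state_after_call t := by
        simp [detect_state_after_call, detect_state_after_call_loop, hec]
      rw [hstep, ih]
      constructor
      · rintro ⟨i, j, hij, hi, hj⟩
        exact ⟨i + 1, j + 1, by omega, by simpa using hi, by simpa using hj⟩
      · rintro ⟨i, j, hij, hi, hj⟩
        have hipos : i ≠ 0 := by
          intro h0; rw [h0] at hi; simp [hec] at hi
        obtain ⟨i', rfl⟩ := Nat.exists_eq_succ_of_ne_zero hipos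
        obtain ⟨j', rfl⟩ := Nat.exists_eq_succ_of_ne_zero (by omega : j ≠ 0)
        exact ⟨i', j', by omega, by simpa using hi, by simpa using hj⟩

-- membership in B's index comprehensions
theorem mem_idxList (tags : List String) (tag : String) (a : Int) :
    a ∈ (PySem.List.enumerate tags).filterMap
        (fun p => if p.2 == tag then some p.1 else none) ↔
      ∃ k : Nat, a = (k : Int) ∧ tags[k]? = some tag := by
  simp only [List.mem_filterMap]
  constructor
  · rintro ⟨p, hp, hif⟩
    obtain ⟨k, hk, rfl⟩ := (PySem.List.mem_enumerate_iff _ _ _).1 hp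
    by_cases htag : tags[k] = tag
    · refine ⟨k, ?_, by simp [List.getElem?_eq_getElem hk, htag]⟩
      have : some ((0 : Int) + (k : Int)) = some a := by simpa [htag] using hif
      have := Option.some.inj this
      omega
    · simp [htag] at hif
  · rintro ⟨k, rfl, hk⟩
    obtain ⟨hklt, heq⟩ := List.getElem?_eq_some_iff.1 hk
    refine ⟨((0 : Int) + (k : Int), tags[k]),
      (PySem.List.mem_enumerate_iff _ _ _).2 ⟨k, hklt, rfl⟩, ?_⟩
    simp [heq]

-- B decides HasCallBeforeWrite
theorem B_iff (ops : List (Int × String × String)) :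
    detect_state_after_call_alt ops = true ↔ HasCallBeforeWrite (ops.map (fun x => x.2.1)) := by
  set tags := ops.map (fun x => x.2.1) with htags
  set calls := (PySem.List.enumerate tags).filterMap
      (fun p => if p.2 == "external_call" then some p.1 else none) with hcalls
  set writes := (PySem.List.enumerate tags).filterMap
      (fun p => if p.2 == "state_write" then some p.1 else none) with hwrites
  have hB : detect_state_after_call_alt ops =
      if calls.isEmpty || writes.isEmpty then false
      else
        match PySem.List.min? calls (fun x => x), PySem.List.max? writes (fun x => x) with
        | some a, some b => decide (a < b)
        | _, _ => false := rfl
  constructor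
  · intro hBtrue
    rw [hB] at hBtrue
    by_cases hce : calls.isEmpty
    · simp [hce] at hBtrue
    by_cases hwe : writes.isEmpty
    · simp [hwe] at hBtrue
    simp only [hce, hwe, Bool.or_self] at hBtrue
    obtain ⟨a, ha⟩ : ∃ a, PySem.List.min? calls (fun x => x) = some a := by
      cases h : PySem.List.min? calls (fun x => x) with
      | none => exact absurd ((PySem.List.min?_eq_none_iff _ _).1 h) (by simpa using hce)
      | some a => exact ⟨a, rfl⟩
    obtain ⟨b, hb⟩ : ∃ b, PySem.List.max? writes (fun x => x) = some b := by
      cases h : PySem.List.max? writes (fun x => x) with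
      | none => exact absurd ((PySem.List.max?_eq_none_iff _ _).1 h) (by simpa using hwe)
      | some b => exact ⟨b, rfl⟩
    rw [if_neg (by simp [hce, hwe]), ha, hb] at hBtrue
    have hab : a < b := by simpa using hBtrue
    have hamem := PySem.List.min?_mem ha
    have hbmem := PySem.List.max?_mem hb
    obtain ⟨i, rfl, hi⟩ := (mem_idxList tags "external_call" a).1 hamem
    obtain ⟨j, rfl, hj⟩ := (mem_idxList tags "state_write" b).1 hbmem
    exact ⟨i, j, by exact_mod_cast hab, hi, hj⟩
  · rintro ⟨i, j, hij, hi, hj⟩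
    have hamem : (i : Int) ∈ calls := (mem_idxList tags "external_call" i).2 ⟨i, rfl, hi⟩
    have hbmem : (j : Int) ∈ writes := (mem_idxList tags "state_write" j).2 ⟨j, rfl, hj⟩
    have hce : calls.isEmpty = false := by
      simp; exact List.ne_nil_of_mem hamem
    have hwe : writes.isEmpty = false := by
      simp; exact List.ne_nil_of_mem hbmem
    obtain ⟨a, ha⟩ : ∃ a, PySem.List.min? calls (fun x => x) = some a := by
      cases h : PySem.List.min? calls (fun x => x) with
      | none => exact absurd ((PySem.List.min?_eq_none_iff _ _).1 h) (List.ne_nil_of_mem hamem)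
      | some a => exact ⟨a, rfl⟩
    obtain ⟨b, hb⟩ : ∃ b, PySem.List.max? writes (fun x => x) = some b := by
      cases h : PySem.List.max? writes (fun x => x) with
      | none => exact absurd ((PySem.List.max?_eq_none_iff _ _).1 h) (List.ne_nil_of_mem hbmem)
      | some b => exact ⟨b, rfl⟩
    have h1 : a ≤ (i : Int) := PySem.List.min?_isMin ha _ hamem
    have h2 : (j : Int) ≤ b := PySem.List.max?_isMax hb _ hbmem
    rw [hB, if_neg (by simp [hce, hwe]), ha, hb]
    have : (i : Int) < (j : Int) := by exact_mod_cast hij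
    simp; omega

theorem equal_all (ops : List (Int × String × String)) :
    detect_state_after_call ops = detect_state_after_call_alt ops := by
  by_cases h : HasCallBeforeWrite (ops.map (fun x => x.2.1))
  · rw [(A_iff ops).2 h, (B_iff ops).2 h]
  · have ha : detect_state_after_call ops ≠ true := fun hc => h ((A_iff ops).1 hc)
    have hb : detect_state_after_call_alt ops ≠ true := fun hc => h ((B_iff ops).1 hc)
    simp at ha hb; rw [ha, hb]

-- ===== VERDICT (by name: the statement is the Claim_ definition above) =====
theorem detect_state_after_call_spec : Claim_equal_detect_state_after_call := by
  intro ops _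
  exact equal_all ops
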